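-- pv_equiv track=rewrite | github.com/hdurrani1107/DBS_repo | HW7/wedding_examples/wedding20.py | panel
-- ===== SOURCE A (Python) =====
-- def panel(word):    #panel method (assume boundary at start) ex: abc
--     if len(word)>1:
--         nminus2 = word[0]   #first letter ex: a
--         nminus1 = [word[:2], word[1] + word[0]]    # first 2 letter combination ex. ['ab','ba']
--         nm1_calc = []
--         nm2_calc = []
--
--         for i in range(2,len(word)): # calculate n-1 and n2 from 3rd letter and on
--             nm1_calc = [x+word[i] for x in nminus1]
--             nm2_calc = [x+word[i]+word[i-1] for x in nminus2]
--             nminus2 = nminus1   # new n-2 is previous n-1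
--             nminus1 = nm1_calc + nm2_calc     # new n-1 is newly calulated n-1 and n-2
--     else:     # if it's one letter or empty word return the word itself
--         nminus1=[word]
--
--     return(nminus1)   # n-1 contains final list
-- ===== SOURCE B (Python) =====
-- def panel(word):
--     # Recursive two-term recurrence over the number of prefix letters, memoized.
--     if len(word) <= 1:
--         return [word]
--     memo = {}
--     def f(m):
--         if m in memo:
--             return memo[m]
--         if m == 1:
--             res = [word[0]]
--         elif m == 2:
--             res = [word[:2], word[1] + word[0]]
--         else:
--             res = [x + word[m-1] for x in f(m-1)] + \
--                   [x + word[m-1] + word[m-2] for x in f(m-2)]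
--         memo[m] = res
--         return res
--     return f(len(word))
-- ===== Notes on version B (the rewrite author's own statement) =====
-- stated objective: alternative
-- what changed: Replaced the forward-iterating loop over two rolling accumulators by a memoized recursive helper f(m) on the number of prefix letters that applies the same two-term recurrence top-down.
import Mathlib
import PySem

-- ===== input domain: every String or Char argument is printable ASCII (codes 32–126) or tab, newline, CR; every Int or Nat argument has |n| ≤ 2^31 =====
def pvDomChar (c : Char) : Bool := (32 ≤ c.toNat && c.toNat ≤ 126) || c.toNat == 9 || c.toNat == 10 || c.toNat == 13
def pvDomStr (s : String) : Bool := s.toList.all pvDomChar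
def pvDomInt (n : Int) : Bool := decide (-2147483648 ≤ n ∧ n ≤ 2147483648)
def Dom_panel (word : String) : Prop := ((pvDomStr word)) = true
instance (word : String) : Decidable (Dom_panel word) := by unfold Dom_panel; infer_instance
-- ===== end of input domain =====

-- B replaces A's forward loop with rolling accumulators by a memoized recursion f(m)
-- on the prefix length applying the same two-term recurrence (objective: alternative).

-- ===== PORT A =====
-- A's loop 'for i in range(2, len(word))' walks the characters from index 2 on,
-- carrying word[i-1] as `prev` and the two accumulators nminus2, nminus1.
-- A's initial nminus2 is the STRING word[0]; iterating it yields its single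
-- character, ported exactly as the singleton list [String.ofList [c0]].
def panelLoopA : List Char → Char → List String → List String → List String
  | [], _, _, nminus1 => nminus1
  | c :: rest, prev, nminus2, nminus1 =>
      panelLoopA rest c nminus1
        ((nminus1.map (fun x => x.push c)) ++
         (nminus2.map (fun x => (x.push c).push prev)))

def panel (word : String) : List String :=
  match word.toList with
  | c0 :: c1 :: rest =>
      panelLoopA rest c1 [String.ofList [c0]]
        [String.ofList [c0, c1], String.ofList [c1, c0]]
  | _ => [word]

-- ===== PORT B =====
-- B's memo dict only avoids recomputation and never changes a value, so the
-- port is the plain recursion f; m counts prefix letters.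
def panelF (cs : List Char) : Nat → List String
  | 0 => []
  | 1 => [String.ofList [cs.getD 0 ' ']]
  | 2 => [String.ofList [cs.getD 0 ' ', cs.getD 1 ' '],
          String.ofList [cs.getD 1 ' ', cs.getD 0 ' ']]
  | (m+3) =>
      ((panelF cs (m+2)).map (fun x => x.push (cs.getD (m+2) ' '))) ++
      ((panelF cs (m+1)).map (fun x => (x.push (cs.getD (m+2) ' ')).push (cs.getD (m+1) ' ')))

def panel_alt (word : String) : List String :=
  if word.toList.length ≤ 1 then [word]
  else panelF word.toList word.toList.length

-- ===== PRECONDITION & SPEC =====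
def Spec_panel (word : String) (out : List String) : Prop := out = panel_alt word
instance (word : String) (out : List String) : Decidable (Spec_panel word out) := by unfold Spec_panel; infer_instance

-- ===== CLAIM (what is proved, stated in full; the proofs are below) =====
def Claim_equal_panel : Prop := ∀ (word : String), Dom_panel word → Spec_panel word (panel word)

-- ===== LEMMAS AND PROOFS =====

-- Loop invariant: after processing prefix of length m (m ≥ 2), the accumulators
-- are f(m-1) and f(m), the carried char is cs[m-1], and the remaining input is cs.drop m.
theorem panelLoopA_inv (cs : List Char) :
    ∀ (rest : List Char) (m : Nat), 2 ≤ m → m ≤ cs.length → cs.drop m = rest →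
      panelLoopA rest (cs.getD (m-1) ' ') (panelF cs (m-1)) (panelF cs m)
        = panelF cs cs.length := by
  intro rest
  induction rest with
  | nil =>
      intro m h2 hle hdrop
      have : cs.length ≤ m := by
        by_contra h
        push Not at h
        have := List.drop_eq_nil_iff.mp hdrop
        omega
      have hm : m = cs.length := le_antisymm hle this
      subst hm
      simp [panelLoopA]
  | cons c r ih =>
      intro m h2 hle hdrop
      have hmlt : m < cs.length := by
        by_contra h
        push Not at h
        have : cs.drop m = [] := List.drop_eq_nil_iff.mpr h
        rw [this] at hdrop; cases hdrop
      have hget : cs[m]? = some c := by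
        have h0 : (cs.drop m)[0]? = cs[m + 0]? := List.getElem?_drop
        rw [hdrop] at h0
        simpa using h0.symm
      have hgetD : cs.getD m ' ' = c := by
        simp [List.getD, hget]
      have hdrop' : cs.drop (m+1) = r := by
        have h1 : cs.drop (m+1) = (cs.drop m).drop 1 := by
          rw [List.drop_drop]
        rw [h1, hdrop]; rfl
      obtain ⟨m', rfl⟩ : ∃ m', m = m' + 2 := ⟨m - 2, by omega⟩
      have hstep :
          (panelF cs (m' + 2)).map (fun x => x.push c) ++
            (panelF cs (m' + 1)).map (fun x => (x.push c).push (cs.getD (m' + 1) ' '))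
          = panelF cs (m' + 3) := by
        have hgetD' : cs[m' + 2]?.getD ' ' = c := by simp [hget]
        simp [panelF, hgetD']
      have := ih (m' + 3) (by omega) (by omega) hdrop'
      simp only [panelLoopA]
      show panelLoopA r c (panelF cs (m' + 2))
          ((panelF cs (m' + 2)).map (fun x => x.push c) ++
           (panelF cs (m' + 1)).map (fun x => (x.push c).push (cs.getD (m' + 2 - 1) ' ')))
        = panelF cs cs.length
      have h1 : (m' + 2 - 1 : Nat) = m' + 1 := by omega
      rw [h1, hstep]
      have h2' : (m' + 3 - 1 : Nat) = m' + 2 := by omega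
      rw [h2', hgetD] at this
      exact this

-- ===== VERDICT (by name: the statement is the Claim_ definition above) =====
theorem panel_spec : Claim_equal_panel := by
  intro word _
  unfold Spec_panel panel panel_alt
  match h : word.toList with
  | [] => simp
  | [c] => simp
  | c0 :: c1 :: rest =>
      have hlen : (c0 :: c1 :: rest).length = rest.length + 2 := by simp
      have hnle : ¬ (c0 :: c1 :: rest).length ≤ 1 := by simp [hlen]
      rw [if_neg hnle]
      have := panelLoopA_inv (c0 :: c1 :: rest) rest 2 (by omega) (by omega) rfl
      simpa [panelF] using this
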